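-- pv_equiv track=rewrite | github.com/kwokcb/MaterialX_Learn | utilities/admin/test_grid.py | create_step_description
-- ===== SOURCE A (Python) =====
-- def create_step_line(step):
--
--     ifstatement = step.get('if', '')
--     if len(ifstatement):
--         # If "matrix.<string>"" is used, we cannot parse it here
--         # remove "matrix." and replace <string> with *<string>*
--         if 'matrix.' in ifstatement:
--             parts = ifstatement.split('matrix.')
--             for i in range(1, len(parts)):
--                 subparts = parts[i].split()
--                 subparts[0] = '*' + subparts[0] + '*'
--                 parts[i] = ' '.join(subparts)
--             ifstatement = ''.join(parts)
--         if_string = 'If (' + ifstatement + ')'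
--         step_string = f"{if_string}\n    - {step.get('name', 'Unnamed Step')}"
--     else:
--         step_string = f"{step.get('name', 'Unnamed Step')}"
--
--     result = step_string
--     return result
--
-- def create_step_description(jobs):
--
--     runner_os = [ { 'os': 'Linux', 'steps': [] },
--                  {  'os': 'Windows', 'steps': [] },
--                  { 'os' : 'macOS', 'steps': [] } ]
--
--     result = ''
--     for job_name, job_details in jobs:
--         step_list = []
--         result += f"## Steps For Job: {job_name}\n"
--         steps = job_details.get('steps', [])
--         for idx, step in enumerate(steps, start=1):
--             step_list.append(f"{create_step_line(step)}")
--
--         # Split into 3 lists. One per os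
--         if job_name == 'build':
--             result += "<table>\n"
--             result += "<tr>\n"
--             result += "<th>Linux Steps</th>\n"
--             result += "<th>Windows Steps</th>\n"
--             result += "<th>macOS Steps</th>\n"
--             result += "</tr>\n"
--
--             result += "<tr>\n"
--
--             linux_list = step_list
--             # Strip out anything that has 'runner.os == 'Windows' or
--             # 'runner.os == 'macOS'
--             linux_list = [step for step in step_list if 'runner.os' not in step or 'Linux' in step]
--             #result += "### Linux Steps\n"
--             result += "<td><ol>"
--             for step in linux_list:
--                 result += f"<li>{step}\n"
--
--             wndows_list = step_list
--             windows_list = [step for step in step_list if 'runner.os' not in step or 'Windows' in step]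
--             #result += "\n### Windows Steps\n"
--             result += "</ol><td><ol>"
--             for step in windows_list:
--                 result += f"<li>{step}\n"
--
--             macos_list = step_list
--             macos_list = [step for step in step_list if 'runner.os' not in step or 'macOS' in step]
--             #result += "\n### macOS Steps\n"
--             result += "<td><ol>"
--             for step in macos_list:
--                 result += f"<li>{step}\n"
--             result += "</tr>\n"
--             result += "</table>\n\n"
--
--         else:
--             result += "<ol>\n"
--             for step in step_list:
--                 result += '<li>' + step + '\n'
--             result += "</ol>\n\n"
--     return result
-- ===== SOURCE B (Python) =====
-- _OS_CELLS = [("Linux", "<td><ol>"), ("Windows", "</ol><td><ol>"), ("macOS", "<td><ol>")]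
--
-- _HEADER = ("<table>\n<tr>\n<th>Linux Steps</th>\n<th>Windows Steps</th>\n"
--            "<th>macOS Steps</th>\n</tr>\n<tr>\n")
--
--
-- def _star(piece):
--     toks = piece.split()
--     return ' '.join(['*' + toks[0] + '*'] + toks[1:])
--
--
-- def _step_line(step):
--     s = step.get('if', '')
--     if len(s):
--         if 'matrix.' in s:
--             pieces = s.split('matrix.')
--             s = pieces[0] + ''.join(_star(p) for p in pieces[1:])
--         return 'If (' + s + ')\n    - ' + step.get('name', 'Unnamed Step')
--     return step.get('name', 'Unnamed Step')
--
--
-- def create_step_description(jobs):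
--     if not jobs:
--         return ''
--     (job_name, job_details), rest = jobs[0], jobs[1:]
--     lines = [_step_line(s) for s in job_details.get('steps', [])]
--     if job_name == 'build':
--         body = _HEADER
--         for os_name, opener in _OS_CELLS:
--             body += opener + ''.join('<li>' + l + '\n' for l in lines
--                                      if 'runner.os' not in l or os_name in l)
--         body += "</tr>\n</table>\n\n"
--     else:
--         body = "<ol>\n" + ''.join('<li>' + l + '\n' for l in lines) + "</ol>\n\n"
--     return "## Steps For Job: " + job_name + "\n" + body + create_step_description(rest)
-- ===== Notes on version B (the rewrite author's own statement) =====
-- stated objective: alternative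
-- what changed: Recursion over jobs (head section ++ recursive tail) replaces A's loop with one growing accumulator string, and a data table of (os-name, cell-opener) pairs driving one parameterized filter-and-render cell loop replaces A's three copy-pasted filter blocks; the matrix rewrite maps a star-helper over the split pieces instead of index-assigning back into the parts list.
import Mathlib
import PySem

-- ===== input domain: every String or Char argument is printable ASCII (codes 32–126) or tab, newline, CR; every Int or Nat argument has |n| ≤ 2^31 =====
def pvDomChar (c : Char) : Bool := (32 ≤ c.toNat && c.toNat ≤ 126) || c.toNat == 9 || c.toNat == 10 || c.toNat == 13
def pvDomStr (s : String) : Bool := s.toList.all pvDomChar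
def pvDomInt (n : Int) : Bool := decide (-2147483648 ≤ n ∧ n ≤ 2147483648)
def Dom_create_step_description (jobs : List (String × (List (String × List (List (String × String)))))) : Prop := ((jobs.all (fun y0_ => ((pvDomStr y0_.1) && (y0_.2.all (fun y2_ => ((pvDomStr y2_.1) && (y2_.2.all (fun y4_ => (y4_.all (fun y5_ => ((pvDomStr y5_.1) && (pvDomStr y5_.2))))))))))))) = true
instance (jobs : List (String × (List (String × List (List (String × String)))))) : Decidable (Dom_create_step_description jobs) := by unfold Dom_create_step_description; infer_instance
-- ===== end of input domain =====

-- B: recursion over jobs plus a data table of (os-name, cell-opener) pairs driving one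
-- parameterized cell renderer, replacing A's loop-with-accumulator and its three copy-pasted
-- filter-and-emit blocks; equal return value on Pre_ (no mutation involved).

-- ===== PORT A =====
-- helper create_step_line, transliterated
def create_step_line (step : List (String × String)) : String :=
  let ifstatement := PySem.Dict.getD (PySem.Dict.mk step) "if" ""
  if PySem.Str.len ifstatement ≠ 0 then
    let ifstatement :=
      if PySem.Str.isIn "matrix." ifstatement then
        let parts := (PySem.Str.split? ifstatement "matrix.").getD []
        let parts := (PySem.List.pyRange 1 parts.length 1).foldl
          (fun ps i =>
            let subparts := PySem.Str.split₀ (PySem.List.pyGetD ps i "")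
            -- subparts[0] = '*' + subparts[0] + '*' : IndexError when subparts = [] (outside Pre_)
            let subparts := PySem.List.pySetD subparts 0 ("*" ++ PySem.List.pyGetD subparts 0 "" ++ "*")
            PySem.List.pySetD ps i (PySem.Str.join " " subparts)) parts
        PySem.Str.join "" parts
      else ifstatement
    let if_string := "If (" ++ ifstatement ++ ")"
    if_string ++ "\n    - " ++ PySem.Dict.getD (PySem.Dict.mk step) "name" "Unnamed Step"
  else
    PySem.Dict.getD (PySem.Dict.mk step) "name" "Unnamed Step"

def create_step_description (jobs : List (String × (List (String × List (List (String × String)))))) : String :=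
  jobs.foldl (fun result jb =>
    let job_name := jb.1
    let job_details := jb.2
    let result := result ++ "## Steps For Job: " ++ job_name ++ "\n"
    let steps := PySem.Dict.getD (PySem.Dict.mk job_details) "steps" []
    let step_list := (PySem.List.enumerate steps 1).foldl
      (fun sl p => sl ++ [create_step_line p.2]) ([] : List String)
    if job_name == "build" then
      let result := result ++ "<table>\n"
      let result := result ++ "<tr>\n"
      let result := result ++ "<th>Linux Steps</th>\n"
      let result := result ++ "<th>Windows Steps</th>\n"
      let result := result ++ "<th>macOS Steps</th>\n"
      let result := result ++ "</tr>\n"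
      let result := result ++ "<tr>\n"
      let linux_list := step_list.filter
        (fun st => !PySem.Str.isIn "runner.os" st || PySem.Str.isIn "Linux" st)
      let result := result ++ "<td><ol>"
      let result := linux_list.foldl (fun r st => r ++ ("<li>" ++ st ++ "\n")) result
      let windows_list := step_list.filter
        (fun st => !PySem.Str.isIn "runner.os" st || PySem.Str.isIn "Windows" st)
      let result := result ++ "</ol><td><ol>"
      let result := windows_list.foldl (fun r st => r ++ ("<li>" ++ st ++ "\n")) result
      let macos_list := step_list.filter
        (fun st => !PySem.Str.isIn "runner.os" st || PySem.Str.isIn "macOS" st)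
      let result := result ++ "<td><ol>"
      let result := macos_list.foldl (fun r st => r ++ ("<li>" ++ st ++ "\n")) result
      let result := result ++ "</tr>\n"
      result ++ "</table>\n\n"
    else
      let result := result ++ "<ol>\n"
      let result := step_list.foldl (fun r st => r ++ ("<li>" ++ st ++ "\n")) result
      result ++ "</ol>\n\n") ""

-- ===== PORT B =====
-- helper _star
def pvStar (piece : String) : String :=
  let toks := PySem.Str.split₀ piece
  PySem.Str.join " " (["*" ++ PySem.List.pyGetD toks 0 "" ++ "*"] ++ PySem.List.slice toks (some 1) none)

-- helper _step_line
def pvStepLine (step : List (String × String)) : String :=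
  let s := PySem.Dict.getD (PySem.Dict.mk step) "if" ""
  if PySem.Str.len s ≠ 0 then
    let s :=
      if PySem.Str.isIn "matrix." s then
        let pieces := (PySem.Str.split? s "matrix.").getD []
        PySem.List.pyGetD pieces 0 "" ++
          PySem.Str.join "" ((PySem.List.slice pieces (some 1) none).map pvStar)
      else s
    "If (" ++ s ++ ")\n    - " ++ PySem.Dict.getD (PySem.Dict.mk step) "name" "Unnamed Step"
  else
    PySem.Dict.getD (PySem.Dict.mk step) "name" "Unnamed Step"

-- module constants _OS_CELLS and _HEADER
def pvOsCells : List (String × String) :=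
  [("Linux", "<td><ol>"), ("Windows", "</ol><td><ol>"), ("macOS", "<td><ol>")]

def pvHeader : String :=
  "<table>\n<tr>\n<th>Linux Steps</th>\n<th>Windows Steps</th>\n<th>macOS Steps</th>\n</tr>\n<tr>\n"

def create_step_description_alt : List (String × (List (String × List (List (String × String))))) → String
  | [] => ""
  | jb :: rest =>
    let lines := (PySem.Dict.getD (PySem.Dict.mk jb.2) "steps" []).map pvStepLine
    let body :=
      if jb.1 == "build" then
        (pvOsCells.foldl (fun b oc =>
          b ++ (oc.2 ++ PySem.Str.join ""
            ((lines.filter (fun l => !PySem.Str.isIn "runner.os" l || PySem.Str.isIn oc.1 l)).map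
              (fun l => "<li>" ++ l ++ "\n")))) pvHeader)
          ++ "</tr>\n</table>\n\n"
      else
        "<ol>\n" ++ PySem.Str.join "" (lines.map (fun l => "<li>" ++ l ++ "\n")) ++ "</ol>\n\n"
    "## Steps For Job: " ++ jb.1 ++ "\n" ++ body ++ create_step_description_alt rest

-- ===== PRECONDITION & SPEC =====
-- Pre_ excludes exactly the inputs where both Pythons raise IndexError: a step whose 'if' string
-- has an empty or whitespace-only segment between one 'matrix.' occurrence and the next (or the end).
def Pre_create_step_description (jobs : List (String × (List (String × List (List (String × String)))))) : Prop :=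
  ∀ jb ∈ jobs, ∀ step ∈ PySem.Dict.getD (PySem.Dict.mk jb.2) "steps" ([] : List (List (String × String))),
    PySem.Str.isIn "matrix." (PySem.Dict.getD (PySem.Dict.mk step) "if" "") = true →
    ∀ p ∈ ((PySem.Str.split? (PySem.Dict.getD (PySem.Dict.mk step) "if" "") "matrix.").getD []).drop 1,
      PySem.Str.split₀ p ≠ []
instance (jobs : List (String × (List (String × List (List (String × String)))))) : Decidable (Pre_create_step_description jobs) := by unfold Pre_create_step_description; infer_instance

def pvWitness_create_step_description : (List (String × (List (String × List (List (String × String)))))) :=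
  [("build", [("steps", [[("name", "Checkout"), ("if", "runner.os == 'Linux'")], [("name", "Build")]])]),
   ("test", [("steps", [[("name", "Run tests"), ("if", "matrix.python > 2")]])])]

def Spec_create_step_description (jobs : List (String × (List (String × List (List (String × String)))))) (out : String) : Prop := out = create_step_description_alt jobs
instance (jobs : List (String × (List (String × List (List (String × String)))))) (out : String) : Decidable (Spec_create_step_description jobs out) := by unfold Spec_create_step_description; infer_instance

-- ===== CLAIM (what is proved, stated in full; the proofs are below) =====
def Claim_equal_create_step_description : Prop := ∀ (jobs : List (String × (List (String × List (List (String × String)))))), Dom_create_step_description jobs → Pre_create_step_description jobs → Spec_create_step_description jobs (create_step_description jobs)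

-- ===== LEMMAS AND PROOFS =====

lemma pv_join_nil : PySem.Str.join "" ([] : List String) = "" := by
  apply String.toList_inj.mp
  simp [PySem.Str.toList_join, PySem.Chars.join_nil]

lemma pv_join_cons (a : String) (l : List String) :
    PySem.Str.join "" (a :: l) = a ++ PySem.Str.join "" l := by
  cases l with
  | nil =>
      apply String.toList_inj.mp
      simp [PySem.Str.toList_join, PySem.Chars.join_singleton, PySem.Chars.join_nil]
  | cons b t =>
      apply String.toList_inj.mp
      simp [PySem.Str.toList_join, PySem.Chars.join_cons_cons]

lemma pv_cat (a b c s : String) (h : a ++ b = c) : a ++ (b ++ s) = c ++ s := by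
  rw [← String.append_assoc, h]

lemma pv_seven (s : String) :
    "<table>\n" ++ ("<tr>\n" ++ ("<th>Linux Steps</th>\n" ++ ("<th>Windows Steps</th>\n" ++
      ("<th>macOS Steps</th>\n" ++ ("</tr>\n" ++ ("<tr>\n" ++ s))))))
    = pvHeader ++ s := by
  simp only [← String.append_assoc]
  congr 1

lemma pv_foldl_li (l : List String) (init : String) :
    l.foldl (fun r st => r ++ ("<li>" ++ st ++ "\n")) init
      = init ++ PySem.Str.join "" (l.map (fun st => "<li>" ++ st ++ "\n")) := by
  induction l generalizing init with
  | nil => simp [pv_join_nil]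
  | cons a t ih =>
      simp only [List.foldl_cons, List.map_cons]
      rw [ih, pv_join_cons]
      simp [String.append_assoc]

lemma pv_step_list (steps : List (List (String × String))) (f : List (String × String) → String) :
    (PySem.List.enumerate steps 1).foldl (fun sl p => sl ++ [f p.2]) ([] : List String)
      = steps.map f := by
  have h := PySem.List.foldl_append_singleton_eq_map (fun p : Int × List (String × String) => f p.2)
    (PySem.List.enumerate steps 1) ([] : List String)
  rw [h, List.nil_append,
    show (fun p : Int × List (String × String) => f p.2) = f ∘ (fun p => p.2) from rfl,
    ← List.map_map, PySem.List.map_snd_enumerate]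

lemma pv_transform_eq_star (p : String) (h : PySem.Str.split₀ p ≠ []) :
    PySem.Str.join " "
        (PySem.List.pySetD (PySem.Str.split₀ p) 0
          ("*" ++ PySem.List.pyGetD (PySem.Str.split₀ p) 0 "" ++ "*"))
      = pvStar p := by
  unfold pvStar
  cases htoks : PySem.Str.split₀ p with
  | nil => exact absurd htoks h
  | cons t ts =>
      rw [PySem.List.pySetD_of_nonneg _ _ (by norm_num)]
      simp [PySem.List.pyGetD_zero_cons, PySem.List.slice_from_one]

lemma pv_fold_set (suf pre : List String)
    (h : ∀ p ∈ suf, PySem.Str.split₀ p ≠ []) :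
    (PySem.List.pyRange (pre.length : Int) ((pre.length : Int) + (suf.length : Int)) 1).foldl
      (fun ps i =>
        PySem.List.pySetD ps i
          (PySem.Str.join " "
            (PySem.List.pySetD (PySem.Str.split₀ (PySem.List.pyGetD ps i "")) 0
              ("*" ++ PySem.List.pyGetD (PySem.Str.split₀ (PySem.List.pyGetD ps i "")) 0 "" ++ "*"))))
      (pre ++ suf)
      = pre ++ suf.map pvStar := by
  induction suf generalizing pre with
  | nil => simp [PySem.List.pyRange_one_eq_nil]
  | cons p t ih =>
      have hp : PySem.Str.split₀ p ≠ [] := h p (by simp)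
      have hget : PySem.List.pyGetD (pre ++ p :: t) (pre.length : Int) "" = p := by
        rw [PySem.List.pyGetD_natCast]; simp
      have hset : PySem.List.pySetD (pre ++ p :: t) (pre.length : Int) (pvStar p) = pre ++ pvStar p :: t := by
        rw [PySem.List.pySetD_natCast]; simp
      have hk : (pre.length : Int) < (pre.length : Int) + (((p :: t).length : Nat) : Int) := by
        have : (0 : Int) < (((p :: t).length : Nat) : Int) := by
          exact_mod_cast Nat.succ_pos t.length
        omega
      rw [PySem.List.pyRange_one_cons hk]
      simp only [List.foldl_cons]
      rw [hget, pv_transform_eq_star p hp, hset]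
      have e1 : (pre.length : Int) + 1 = (((pre ++ [pvStar p]).length : Nat) : Int) := by
        simp
      have e2 : (pre.length : Int) + (((p :: t).length : Nat) : Int)
          = (((pre ++ [pvStar p]).length : Nat) : Int) + ((t.length : Nat) : Int) := by
        simp; ring
      rw [e1, e2, show pre ++ pvStar p :: t = (pre ++ [pvStar p]) ++ t by simp]
      rw [ih (pre ++ [pvStar p]) (fun q hq => h q (List.mem_cons_of_mem _ hq))]
      simp

lemma pv_matrix_eq (parts : List String)
    (h : ∀ p ∈ parts.drop 1, PySem.Str.split₀ p ≠ []) :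
    PySem.Str.join ""
      ((PySem.List.pyRange 1 (parts.length : Int) 1).foldl
        (fun ps i =>
          PySem.List.pySetD ps i
            (PySem.Str.join " "
              (PySem.List.pySetD (PySem.Str.split₀ (PySem.List.pyGetD ps i "")) 0
                ("*" ++ PySem.List.pyGetD (PySem.Str.split₀ (PySem.List.pyGetD ps i "")) 0 "" ++ "*"))))
        parts)
      = PySem.List.pyGetD parts 0 "" ++
          PySem.Str.join "" ((PySem.List.slice parts (some 1) none).map pvStar) := by
  cases parts with
  | nil =>
      rw [show ((([] : List String).length : Nat) : Int) = 0 by simp,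
        PySem.List.pyRange_one_eq_nil (by norm_num)]
      simp [pv_join_nil, PySem.List.pyGetD_zero, PySem.List.slice_from_one]
  | cons x tl =>
      have hfs := pv_fold_set tl [x] (by simpa using h)
      have e : (1 : Int) + ((tl.length : Nat) : Int) = (((x :: tl).length : Nat) : Int) := by
        simp [List.length_cons]; omega
      rw [show ([x] : List String) ++ tl = x :: tl by simp,
        show (([x] : List String).length : Int) = (1 : Int) by simp, e] at hfs
      rw [hfs, PySem.List.pyGetD_zero_cons, PySem.List.slice_from_one]
      rw [show ([x] : List String) ++ tl.map pvStar = x :: tl.map pvStar by simp, pv_join_cons]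
      rfl

lemma pv_step_line_eq (step : List (String × String))
    (h : PySem.Str.isIn "matrix." (PySem.Dict.getD (PySem.Dict.mk step) "if" "") = true →
      ∀ p ∈ ((PySem.Str.split? (PySem.Dict.getD (PySem.Dict.mk step) "if" "") "matrix.").getD []).drop 1,
        PySem.Str.split₀ p ≠ []) :
    create_step_line step = pvStepLine step := by
  simp only [create_step_line, pvStepLine]
  by_cases hlen : PySem.Str.len (PySem.Dict.getD (PySem.Dict.mk step) "if" "") ≠ 0
  · rw [if_pos hlen, if_pos hlen]
    by_cases hm : PySem.Str.isIn "matrix." (PySem.Dict.getD (PySem.Dict.mk step) "if" "") = true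
    · rw [if_pos hm, if_pos hm, pv_matrix_eq _ (h hm)]
      simp only [String.append_assoc]
      rw [pv_cat ")" "\n    - " ")\n    - " _ rfl]
    · rw [if_neg hm, if_neg hm]
      simp only [String.append_assoc]
      rw [pv_cat ")" "\n    - " ")\n    - " _ rfl]
  · rw [if_neg hlen, if_neg hlen]

lemma pv_main_go (jobs : List (String × (List (String × List (List (String × String))))))
    (r : String) (hpre : Pre_create_step_description jobs) :
    jobs.foldl (fun result jb =>
      let job_name := jb.1
      let job_details := jb.2
      let result := result ++ "## Steps For Job: " ++ job_name ++ "\n"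
      let steps := PySem.Dict.getD (PySem.Dict.mk job_details) "steps" []
      let step_list := (PySem.List.enumerate steps 1).foldl
        (fun sl p => sl ++ [create_step_line p.2]) ([] : List String)
      if job_name == "build" then
        let result := result ++ "<table>\n"
        let result := result ++ "<tr>\n"
        let result := result ++ "<th>Linux Steps</th>\n"
        let result := result ++ "<th>Windows Steps</th>\n"
        let result := result ++ "<th>macOS Steps</th>\n"
        let result := result ++ "</tr>\n"
        let result := result ++ "<tr>\n"
        let linux_list := step_list.filter
          (fun st => !PySem.Str.isIn "runner.os" st || PySem.Str.isIn "Linux" st)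
        let result := result ++ "<td><ol>"
        let result := linux_list.foldl (fun r st => r ++ ("<li>" ++ st ++ "\n")) result
        let windows_list := step_list.filter
          (fun st => !PySem.Str.isIn "runner.os" st || PySem.Str.isIn "Windows" st)
        let result := result ++ "</ol><td><ol>"
        let result := windows_list.foldl (fun r st => r ++ ("<li>" ++ st ++ "\n")) result
        let macos_list := step_list.filter
          (fun st => !PySem.Str.isIn "runner.os" st || PySem.Str.isIn "macOS" st)
        let result := result ++ "<td><ol>"
        let result := macos_list.foldl (fun r st => r ++ ("<li>" ++ st ++ "\n")) result
        let result := result ++ "</tr>\n"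
        result ++ "</table>\n\n"
      else
        let result := result ++ "<ol>\n"
        let result := step_list.foldl (fun r st => r ++ ("<li>" ++ st ++ "\n")) result
        result ++ "</ol>\n\n") r
    = r ++ create_step_description_alt jobs := by
  induction jobs generalizing r with
  | nil => simp [create_step_description_alt]
  | cons jb t ih =>
      have hjb := fun step hs => hpre jb (by simp) step hs
      have htl : Pre_create_step_description t := fun jb' hj step hs =>
        hpre jb' (List.mem_cons_of_mem _ hj) step hs
      simp only [List.foldl_cons]
      rw [ih _ htl]
      show _ = r ++ create_step_description_alt (jb :: t)
      have hmap : (PySem.Dict.getD (PySem.Dict.mk jb.2) "steps" ([] : List (List (String × String)))).map create_step_line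
          = (PySem.Dict.getD (PySem.Dict.mk jb.2) "steps" ([] : List (List (String × String)))).map pvStepLine :=
        List.map_congr_left (fun s hs => pv_step_line_eq s (hjb s hs))
      simp only [create_step_description_alt, pvOsCells, List.foldl_cons, List.foldl_nil]
      simp only [pv_step_list, hmap]
      by_cases hb : (jb.1 == "build") = true
      · rw [if_pos hb, if_pos hb]
        rw [pv_foldl_li, pv_foldl_li, pv_foldl_li]
        simp only [String.append_assoc]
        rw [pv_seven, pv_cat "</tr>\n" "</table>\n\n" "</tr>\n</table>\n\n" _ rfl]
      · rw [if_neg hb, if_neg hb]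
        rw [pv_foldl_li]
        simp only [String.append_assoc]

theorem pv_main (jobs : List (String × (List (String × List (List (String × String))))))
    (hpre : Pre_create_step_description jobs) :
    create_step_description jobs = create_step_description_alt jobs := by
  unfold create_step_description
  rw [pv_main_go jobs "" hpre]
  simp

-- ===== VERDICT (by name: the statement is the Claim_ definition above) =====
theorem create_step_description_spec : Claim_equal_create_step_description := by
  intro jobs _ hpre
  unfold Spec_create_step_description
  exact pv_main jobs hpre
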